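-- pv_equiv track=rewrite | github.com/Mumulhy/LeetCode | 542-01矩阵/UpdateMatrix.py | nextLayer
-- ===== SOURCE A (Python) =====
-- def nextLayer(matrix):
--     m = len(matrix)
--     n = len(matrix[0])
--     ori_matrix = [[item for item in row] for row in matrix]
--     for i in range(m):
--         for j in range(n):
--             if matrix[i][j]:
--                 is_not_edge = 1
--                 if i != 0:
--                     is_not_edge = is_not_edge * ori_matrix[i-1][j]
--                 if i != m-1:
--                     is_not_edge = is_not_edge * ori_matrix[i+1][j]
--                 if j != 0:
--                     is_not_edge = is_not_edge * ori_matrix[i][j-1]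
--                 if j != n-1:
--                     is_not_edge = is_not_edge * ori_matrix[i][j+1]
--                 if is_not_edge == 0:
--                     matrix[i][j] = 0
--     return matrix
-- ===== SOURCE B (Python) =====
-- def nextLayer(matrix):
--     m = len(matrix)
--     n = len(matrix[0])
--     to_erode = set()
--     for i in range(m):
--         for j in range(n):
--             if not matrix[i][j]:
--                 for x, y in ((i - 1, j), (i + 1, j), (i, j - 1), (i, j + 1)):
--                     if 0 <= x < m and 0 <= y < n and matrix[x][y]:
--                         to_erode.add((x, y))
--     for i, j in to_erode:
--         matrix[i][j] = 0
--     return matrix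
-- ===== Notes on version B (the rewrite author's own statement) =====
-- stated objective: alternative
-- what changed: Inverted the traversal: instead of testing every live cell's running product of up to four neighbor values on a defensive full copy, B scans once for zero cells, collects the coordinates of their in-bounds truthy neighbors into a deferred to_erode set, and only afterwards writes the zeros back into the matrix.
import Mathlib
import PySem

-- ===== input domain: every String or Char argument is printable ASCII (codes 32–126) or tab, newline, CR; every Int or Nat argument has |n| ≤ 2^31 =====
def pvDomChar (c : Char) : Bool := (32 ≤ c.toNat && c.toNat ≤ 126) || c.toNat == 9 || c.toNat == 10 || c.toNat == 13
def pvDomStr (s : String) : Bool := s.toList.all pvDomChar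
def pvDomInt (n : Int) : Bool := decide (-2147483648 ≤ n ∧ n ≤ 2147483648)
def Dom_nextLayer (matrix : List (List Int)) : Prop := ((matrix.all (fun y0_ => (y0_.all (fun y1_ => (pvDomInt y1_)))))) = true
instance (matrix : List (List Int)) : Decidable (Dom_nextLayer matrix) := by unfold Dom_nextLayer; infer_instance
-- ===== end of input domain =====

-- B inverts the traversal (alternative): it scans once for ZERO cells, collects their in-bounds
-- truthy neighbors into a deferred to_erode set, then writes the zeros back — no defensive copy.
-- Both A and B mutate the argument and return it; the equivalence proved is about the RETURN value.

-- ===== PORT A =====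
-- matrix[i][j] read and ori_matrix[x][y] read (all in range under Pre_)
def pvGet2 (g : List (List Int)) (i j : Int) : Int :=
  PySem.List.pyGetD (PySem.List.pyGetD g i []) j 0

-- matrix[i][j] = v (in range under Pre_)
def pvSet2 (g : List (List Int)) (i j : Int) (v : Int) : List (List Int) :=
  PySem.List.pySetD g i (PySem.List.pySetD (PySem.List.pyGetD g i []) j v)

def nextLayer (matrix : List (List Int)) : List (List Int) :=
  let m : Int := matrix.length
  let n : Int := (PySem.List.pyGetD matrix 0 []).length
  let ori := matrix.map (fun row => row.map (fun item => item))
  (PySem.List.pyRange 0 m 1).foldl (fun mat i =>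
    (PySem.List.pyRange 0 n 1).foldl (fun mat j =>
      if pvGet2 mat i j ≠ 0 then
        let e1 : Int := 1
        let e2 := if i ≠ 0 then e1 * pvGet2 ori (i-1) j else e1
        let e3 := if i ≠ m-1 then e2 * pvGet2 ori (i+1) j else e2
        let e4 := if j ≠ 0 then e3 * pvGet2 ori i (j-1) else e3
        let e5 := if j ≠ n-1 then e4 * pvGet2 ori i (j+1) else e4
        if e5 = 0 then pvSet2 mat i j 0 else mat
      else mat) mat) matrix

-- ===== PORT B =====
-- the four orthogonal neighbor coordinates of (i, j)
def pvNbrs (i j : Int) : List (Int × Int) := [(i - 1, j), (i + 1, j), (i, j - 1), (i, j + 1)]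

-- the to_erode set: for every zero cell, its in-bounds truthy neighbors
def pvErode (matrix : List (List Int)) : PySem.Set (Int × Int) :=
  (PySem.List.pyRange 0 (matrix.length : Int) 1).foldl (fun s i =>
    (PySem.List.pyRange 0 ((PySem.List.pyGetD matrix 0 []).length : Int) 1).foldl (fun s j =>
      if pvGet2 matrix i j = 0 then
        (pvNbrs i j).foldl (fun s r =>
          if 0 ≤ r.1 ∧ r.1 < (matrix.length : Int) ∧ 0 ≤ r.2 ∧
              r.2 < ((PySem.List.pyGetD matrix 0 []).length : Int) ∧ pvGet2 matrix r.1 r.2 ≠ 0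
          then PySem.Set.add s r else s) s
      else s) s)
    PySem.Set.empty

-- deferred writes: matrix[i][j] = 0 for each collected coordinate (order-independent: all writes are 0)
def nextLayer_alt (matrix : List (List Int)) : List (List Int) :=
  (pvErode matrix).foldl (fun mat p => pvSet2 mat p.1 p.2 0) matrix

-- ===== PRECONDITION & SPEC =====
-- Pre_ excludes exactly the inputs on which A raises IndexError: the empty matrix
-- (matrix[0]) and ragged matrices with a row shorter than the first row.
def Pre_nextLayer (matrix : List (List Int)) : Prop :=
  matrix ≠ [] ∧ ∀ row ∈ matrix, (PySem.List.pyGetD matrix 0 []).length ≤ row.length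
instance (matrix : List (List Int)) : Decidable (Pre_nextLayer matrix) := by
  unfold Pre_nextLayer; infer_instance
def pvWitness_nextLayer : List (List Int) := [[0, 1], [1, 1]]
def Spec_nextLayer (matrix : List (List Int)) (out : List (List Int)) : Prop := out = nextLayer_alt matrix
instance (matrix : List (List Int)) (out : List (List Int)) : Decidable (Spec_nextLayer matrix out) := by unfold Spec_nextLayer; infer_instance

-- ===== CLAIM (what is proved, stated in full; the proofs are below) =====
def Claim_equal_nextLayer : Prop := ∀ (matrix : List (List Int)), Dom_nextLayer matrix → Pre_nextLayer matrix → Spec_nextLayer matrix (nextLayer matrix)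

-- ===== LEMMAS AND PROOFS =====

abbrev pvCond (matrix : List (List Int)) (i j : Nat) (v : Int) : Prop :=
  (j : Int) < ((PySem.List.pyGetD matrix 0 []).length : Int) ∧ v ≠ 0 ∧
    (((pvNbrs i j).filter
        (fun r => decide (0 ≤ r.1 ∧ r.1 < (matrix.length : Int) ∧ 0 ≤ r.2 ∧ r.2 < ((PySem.List.pyGetD matrix 0 []).length : Int)))).any
      (fun r => pvGet2 matrix r.1 r.2 == 0)) = true

def pvN0 (matrix : List (List Int)) : Nat := (PySem.List.pyGetD matrix 0 []).length

-- the is_not_edge product of A at cell (i, j)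
def pvE (matrix : List (List Int)) (m n i j : Int) : Int :=
  let e1 : Int := 1
  let e2 := if i ≠ 0 then e1 * pvGet2 matrix (i-1) j else e1
  let e3 := if i ≠ m-1 then e2 * pvGet2 matrix (i+1) j else e2
  let e4 := if j ≠ 0 then e3 * pvGet2 matrix i (j-1) else e3
  let e5 := if j ≠ n-1 then e4 * pvGet2 matrix i (j+1) else e4
  e5

-- one cell update of A, at Nat coordinates
def pvStep (matrix mat : List (List Int)) (i j : Nat) : List (List Int) :=
  if pvGet2 mat i j ≠ 0 ∧ pvE matrix matrix.length (pvN0 matrix) i j = 0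
  then mat.set i ((mat.getD i []).set j 0) else mat

-- partially-transformed row: cells with index < k transformed
def pvRowT (matrix : List (List Int)) (i k : Nat) (row : List Int) : List Int :=
  row.mapIdx (fun j v => if j < k ∧ pvCond matrix i j v then 0 else v)

-- matrix with rows < i fully transformed and row i transformed up to column k
def pvMid (matrix : List (List Int)) (i k : Nat) : List (List Int) :=
  matrix.mapIdx (fun r row =>
    if r < i then pvRowT matrix r row.length row
    else if r = i then pvRowT matrix i k row else row)

theorem pvRowT_length (matrix : List (List Int)) (i k : Nat) (row : List Int) :
    (pvRowT matrix i k row).length = row.length := by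
  simp [pvRowT]

theorem pvRowT_getElem (matrix : List (List Int)) (i k : Nat) (row : List Int)
    (j : Nat) (h : j < (pvRowT matrix i k row).length) :
    (pvRowT matrix i k row)[j] =
      if j < k ∧ pvCond matrix i j (row[j]'(by simpa [pvRowT] using h)) then 0
      else row[j]'(by simpa [pvRowT] using h) := by
  simp [pvRowT]

theorem pvRowT_zero (matrix : List (List Int)) (i : Nat) (row : List Int) :
    pvRowT matrix i 0 row = row := by
  apply List.ext_getElem
  · simp [pvRowT]
  · intro j h1 h2
    simp [pvRowT]

theorem pvMid_length (matrix : List (List Int)) (i k : Nat) :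
    (pvMid matrix i k).length = matrix.length := by
  simp [pvMid]

theorem pvMid_getElem (matrix : List (List Int)) (i k : Nat) (r : Nat)
    (h : r < (pvMid matrix i k).length) :
    (pvMid matrix i k)[r] =
      (if r < i then pvRowT matrix r (matrix[r]'(by simpa [pvMid] using h)).length (matrix[r]'(by simpa [pvMid] using h))
       else if r = i then pvRowT matrix i k (matrix[r]'(by simpa [pvMid] using h))
       else matrix[r]'(by simpa [pvMid] using h)) := by
  simp [pvMid]

theorem pvMid_zero (matrix : List (List Int)) : pvMid matrix 0 0 = matrix := by
  apply List.ext_getElem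
  · simp [pvMid]
  · intro r h1 h2
    rw [pvMid_getElem]
    simp [pvRowT_zero]

theorem pvMulStep (c : Prop) [inst : Decidable c] (e a : Int) :
    ((if c then e * a else e) = 0) ↔ (e = 0 ∨ (c ∧ a = 0)) := by
  split_ifs with h <;> simp [mul_eq_zero, h]

theorem pvE_zero (matrix : List (List Int)) (m n i j : Int) :
    pvE matrix m n i j = 0 ↔
      ((i ≠ 0 ∧ pvGet2 matrix (i-1) j = 0) ∨
       (i ≠ m-1 ∧ pvGet2 matrix (i+1) j = 0) ∨
       (j ≠ 0 ∧ pvGet2 matrix i (j-1) = 0) ∨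
       (j ≠ n-1 ∧ pvGet2 matrix i (j+1) = 0)) := by
  have h1 : (1:Int) ≠ 0 := one_ne_zero
  simp only [pvE]
  rw [pvMulStep, pvMulStep, pvMulStep, pvMulStep]
  tauto

theorem pvGuard (matrix : List (List Int)) (k l : Nat) (hk : k < matrix.length)
    (hl : l < pvN0 matrix) (v : Int) :
    (v ≠ 0 ∧ pvE matrix matrix.length (pvN0 matrix) k l = 0) ↔ pvCond matrix k l v := by
  have hkm : (k:Int) < (matrix.length:Int) := by exact_mod_cast hk
  have hln : (l:Int) < ((pvN0 matrix : Nat):Int) := by exact_mod_cast hl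
  rw [pvE_zero]
  simp only [pvN0] at hln
  simp only [pvCond, pvNbrs, List.any_eq_true, List.mem_filter, List.mem_cons,
    List.not_mem_nil, or_false, decide_eq_true_eq, beq_iff_eq, pvN0]
  constructor
  · rintro ⟨hv, hD⟩
    refine ⟨by omega, hv, ?_⟩
    rcases hD with ⟨hne, hg⟩|⟨hne, hg⟩|⟨hne, hg⟩|⟨hne, hg⟩
    · exact ⟨((k:Int)-1, (l:Int)), ⟨Or.inl rfl, by omega, by omega, by omega, by omega⟩, hg⟩
    · exact ⟨((k:Int)+1, (l:Int)), ⟨Or.inr (Or.inl rfl), by omega, by omega, by omega, by omega⟩, hg⟩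
    · exact ⟨((k:Int), (l:Int)-1), ⟨Or.inr (Or.inr (Or.inl rfl)), by omega, by omega, by omega, by omega⟩, hg⟩
    · exact ⟨((k:Int), (l:Int)+1), ⟨Or.inr (Or.inr (Or.inr rfl)), by omega, by omega, by omega, by omega⟩, hg⟩
  · rintro ⟨hlt, hv, x, ⟨hx, hb⟩, hg⟩
    refine ⟨hv, ?_⟩
    obtain ⟨b1, b2, b3, b4⟩ := hb
    rcases hx with rfl|rfl|rfl|rfl <;> dsimp only at b1 b2 b3 b4 hg
    · exact Or.inl ⟨by omega, hg⟩
    · exact Or.inr (Or.inl ⟨by omega, hg⟩)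
    · exact Or.inr (Or.inr (Or.inl ⟨by omega, hg⟩))
    · exact Or.inr (Or.inr (Or.inr ⟨by omega, hg⟩))

theorem pvRowT_ext (matrix : List (List Int)) (i : Nat) (k1 k2 : Nat) (row : List Int)
    (h : ∀ j : Nat, (hj : j < row.length) → ((j < k1 ∧ pvCond matrix i j (row[j]'hj)) ↔ (j < k2 ∧ pvCond matrix i j (row[j]'hj)))) :
    pvRowT matrix i k1 row = pvRowT matrix i k2 row := by
  apply List.ext_getElem
  · simp [pvRowT_length]
  · intro j h1 h2
    rw [pvRowT_getElem, pvRowT_getElem]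
    have hj : j < row.length := by simpa [pvRowT_length] using h1
    by_cases hc : j < k1 ∧ pvCond matrix i j (row[j]'hj)
    · rw [if_pos hc, if_pos ((h j hj).mp hc)]
    · rw [if_neg hc, if_neg (fun hx => hc ((h j hj).mpr hx))]

theorem pvMid_getElem_ne (matrix : List (List Int)) (i k1 k2 : Nat) (r : Nat) (hr : r ≠ i)
    (h1 : r < (pvMid matrix i k1).length) (h2 : r < (pvMid matrix i k2).length) :
    (pvMid matrix i k1)[r] = (pvMid matrix i k2)[r] := by
  rw [pvMid_getElem, pvMid_getElem]
  simp [hr]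

theorem pvStep_mid (matrix : List (List Int)) (hpre : Pre_nextLayer matrix)
    (k l : Nat) (hk : k < matrix.length) (hl : l < pvN0 matrix) :
    pvStep matrix (pvMid matrix k l) k l = pvMid matrix k (l+1) := by
  have hrow : pvN0 matrix ≤ (matrix[k]'hk).length := hpre.2 _ (List.getElem_mem hk)
  have hlr : l < (matrix[k]'hk).length := lt_of_lt_of_le hl hrow
  have hmlen : (pvMid matrix k l).length = matrix.length := pvMid_length matrix k l
  have hkm : k < (pvMid matrix k l).length := by omega
  have hmidrow : (pvMid matrix k l)[k]'hkm = pvRowT matrix k l (matrix[k]'hk) := by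
    rw [pvMid_getElem]
    simp
  have hrowlen : l < ((pvMid matrix k l)[k]'hkm).length := by
    rw [hmidrow, pvRowT_length]; exact hlr
  have hgetD : (pvMid matrix k l).getD k [] = (pvMid matrix k l)[k]'hkm :=
    List.getD_eq_getElem _ _ hkm
  have hread : pvGet2 (pvMid matrix k l) k l = (matrix[k]'hk)[l]'hlr := by
    simp only [pvGet2, PySem.List.pyGetD_natCast, hgetD, hmidrow]
    rw [List.getD_eq_getElem _ _ (by rw [pvRowT_length]; exact hlr), pvRowT_getElem]
    simp
  have hguard := pvGuard matrix k l hk hl ((matrix[k]'hk)[l]'hlr)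
  rw [pvStep, hread]
  by_cases hc : pvCond matrix k l ((matrix[k]'hk)[l]'hlr)
  · rw [if_pos (hguard.mpr hc)]
    apply List.ext_getElem
    · simp [pvMid_length]
    · intro r h1 h2
      rw [List.getElem_set]
      split_ifs with hrk
      · subst hrk
        rw [pvMid_getElem]
        simp only [Nat.lt_irrefl, if_pos, reduceIte]
        rw [hgetD, hmidrow]
        apply List.ext_getElem
        · simp [pvRowT_length]
        · intro j hj1 hj2
          have hjr : j < (matrix[k]'hk).length := by simpa [pvRowT_length] using hj2
          rw [List.getElem_set]
          split_ifs with hjl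
          · subst hjl
            rw [pvRowT_getElem]
            rw [if_pos ⟨by omega, hc⟩]
          · rw [pvRowT_getElem, pvRowT_getElem]
            by_cases hcj : j < l ∧ pvCond matrix k j ((matrix[k]'hk)[j]'hjr)
            · rw [if_pos hcj, if_pos ⟨by omega, hcj.2⟩]
            · rw [if_neg hcj, if_neg (by rintro ⟨hb, hcc⟩; exact hcj ⟨by omega, hcc⟩)]
      · exact pvMid_getElem_ne matrix k l (l+1) r (Ne.symm hrk) (by simpa using h1) h2
  · rw [if_neg (fun hx => hc (hguard.mp hx))]
    apply List.ext_getElem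
    · simp [pvMid_length]
    · intro r h1 h2
      by_cases hrk : r = k
      · subst hrk
        rw [pvMid_getElem, pvMid_getElem]
        simp only [Nat.lt_irrefl, reduceIte]
        apply pvRowT_ext
        intro j hj
        constructor
        · rintro ⟨hb, hcc⟩; exact ⟨by omega, hcc⟩
        · rintro ⟨hb, hcc⟩
          by_cases hjl : j = l
          · subst hjl; exact absurd hcc hc
          · exact ⟨by omega, hcc⟩
      · exact pvMid_getElem_ne matrix k l (l+1) r hrk h1 h2

theorem pvMid_advance (matrix : List (List Int)) (_hpre : Pre_nextLayer matrix)
    (i : Nat) (hi : i < matrix.length) :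
    pvMid matrix i (pvN0 matrix) = pvMid matrix (i+1) 0 := by
  apply List.ext_getElem
  · simp [pvMid_length]
  · intro r h1 h2
    rw [pvMid_getElem, pvMid_getElem]
    by_cases ha : r < i
    · rw [if_pos ha, if_pos (by omega : r < i + 1)]
    · by_cases hb : r = i
      · subst hb
        rw [if_neg ha, if_pos rfl, if_pos (by omega : r < r + 1)]
        apply pvRowT_ext
        intro j hj
        constructor
        · rintro ⟨_, hc⟩; exact ⟨hj, hc⟩
        · rintro ⟨_, hc⟩
          refine ⟨?_, hc⟩
          have := hc.1
          simp only [pvN0]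
          exact_mod_cast this
      · rw [if_neg ha, if_neg hb, if_neg (by omega : ¬ r < i + 1)]
        by_cases hcq : r = i + 1
        · rw [if_pos hcq, pvRowT_zero]
        · rw [if_neg hcq]

theorem pvRangeNat (n : Nat) :
    PySem.List.pyRange 0 (n : Int) 1 = (List.range n).map (fun (k : Nat) => (k : Int)) := by
  simp [PySem.List.pyRange_one]
theorem pvFoldlRange {α : Type} (f : α → Int → α) (n : Nat) (init : α) :
    (PySem.List.pyRange 0 (n : Int) 1).foldl f init
      = (List.range n).foldl (fun a (k : Nat) => f a (k : Int)) init := by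
  rw [pvRangeNat, List.foldl_map]

set_option maxHeartbeats 2000000 in
theorem pvA_fold (matrix : List (List Int)) :
    nextLayer matrix =
      (List.range matrix.length).foldl
        (fun mat i => (List.range (pvN0 matrix)).foldl (fun mat j => pvStep matrix mat i j) mat)
        matrix := by
  unfold nextLayer
  rw [pvFoldlRange]
  apply PySem.List.foldl_congr_mem
  intro mat i _
  rw [pvFoldlRange]
  apply PySem.List.foldl_congr_mem
  intro mat' j _
  show _ = pvStep matrix mat' i j
  simp only [pvStep, pvE, pvSet2, pvN0, List.map_id', PySem.List.pySetD_natCast,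
    PySem.List.pyGetD_natCast]
  split_ifs <;> tauto

theorem pvInner (matrix : List (List Int)) (hpre : Pre_nextLayer matrix)
    (k : Nat) (hk : k < matrix.length) :
    ∀ l, l ≤ pvN0 matrix →
      (List.range l).foldl (fun mat j => pvStep matrix mat k j) (pvMid matrix k 0) =
        pvMid matrix k l := by
  intro l
  induction l with
  | zero => intro _; rfl
  | succ l ih =>
    intro hle
    rw [List.range_succ, List.foldl_append, ih (by omega)]
    exact pvStep_mid matrix hpre k l hk (by omega)

theorem pvOuter (matrix : List (List Int)) (hpre : Pre_nextLayer matrix) :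
    ∀ i, i ≤ matrix.length →
      (List.range i).foldl
        (fun mat i => (List.range (pvN0 matrix)).foldl (fun mat j => pvStep matrix mat i j) mat)
        matrix = pvMid matrix i 0 := by
  intro i
  induction i with
  | zero => intro _; exact (pvMid_zero matrix).symm
  | succ i ih =>
    intro hle
    rw [List.range_succ, List.foldl_append, ih (by omega)]
    simp only [List.foldl_cons, List.foldl_nil]
    rw [pvInner matrix hpre i (by omega) (pvN0 matrix) (le_refl _),
      pvMid_advance matrix hpre i (by omega)]

theorem pvA_eq_mid (matrix : List (List Int)) (h : Pre_nextLayer matrix) :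
    nextLayer matrix = pvMid matrix matrix.length 0 := by
  rw [pvA_fold, pvOuter matrix h matrix.length (le_refl _)]

-- ===== B-side lemmas =====

-- membership through a foldl whose step satisfies a pointwise iff
theorem pvMemFoldGen {β α : Type} (F : List α → β → List α) (P : β → α → Prop)
    (h : ∀ s x p, p ∈ F s x ↔ p ∈ s ∨ P x p) :
    ∀ (L : List β) (s : List α) (p : α), p ∈ L.foldl F s ↔ p ∈ s ∨ ∃ x ∈ L, P x p := by
  intro L
  induction L with
  | nil => intro s p; simp
  | cons x L ih =>
    intro s p
    rw [List.foldl_cons, ih, h s x p]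
    constructor
    · rintro ((hs | hP) | ⟨y, hy, hp⟩)
      · exact Or.inl hs
      · exact Or.inr ⟨x, List.mem_cons_self, hP⟩
      · exact Or.inr ⟨y, List.mem_cons_of_mem _ hy, hp⟩
    · rintro (hs | ⟨y, hy, hp⟩)
      · exact Or.inl (Or.inl hs)
      · rcases List.mem_cons.mp hy with rfl | hy'
        · exact Or.inl (Or.inr hp)
        · exact Or.inr ⟨y, hy', hp⟩

-- adjacency is symmetric
theorem pvNbrs_symm (a b x y : Int) : (x, y) ∈ pvNbrs a b ↔ (a, b) ∈ pvNbrs x y := by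
  simp only [pvNbrs, List.mem_cons, List.not_mem_nil, or_false, Prod.mk.injEq]
  omega

-- membership in the to_erode set
theorem pvMemErode (matrix : List (List Int)) (p : Int × Int) :
    p ∈ pvErode matrix ↔
      ∃ i : Nat, i < matrix.length ∧ ∃ j : Nat, j < (PySem.List.pyGetD matrix 0 []).length ∧
        pvGet2 matrix i j = 0 ∧ ∃ r ∈ pvNbrs (i : Int) (j : Int),
          (0 ≤ r.1 ∧ r.1 < (matrix.length : Int) ∧ 0 ≤ r.2 ∧
            r.2 < ((PySem.List.pyGetD matrix 0 []).length : Int) ∧ pvGet2 matrix r.1 r.2 ≠ 0) ∧ p = r := by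
  have hin : ∀ (i j : Int) (s : List (Int × Int)) (p : Int × Int),
      p ∈ (pvNbrs i j).foldl (fun s r =>
          if 0 ≤ r.1 ∧ r.1 < (matrix.length : Int) ∧ 0 ≤ r.2 ∧
              r.2 < ((PySem.List.pyGetD matrix 0 []).length : Int) ∧ pvGet2 matrix r.1 r.2 ≠ 0
          then PySem.Set.add s r else s) s ↔
        p ∈ s ∨ ∃ r ∈ pvNbrs i j,
          (0 ≤ r.1 ∧ r.1 < (matrix.length : Int) ∧ 0 ≤ r.2 ∧
            r.2 < ((PySem.List.pyGetD matrix 0 []).length : Int) ∧ pvGet2 matrix r.1 r.2 ≠ 0) ∧ p = r := by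
    intro i j
    apply pvMemFoldGen
    intro s r p
    split_ifs with hcnd
    · simp [PySem.Set.mem_add, hcnd]
    · simp [hcnd]
  have hmid : ∀ (i : Int) (s : List (Int × Int)) (p : Int × Int),
      p ∈ (PySem.List.pyRange 0 ((PySem.List.pyGetD matrix 0 []).length : Int) 1).foldl
          (fun s j =>
            if pvGet2 matrix i j = 0 then
              (pvNbrs i j).foldl (fun s r =>
                if 0 ≤ r.1 ∧ r.1 < (matrix.length : Int) ∧ 0 ≤ r.2 ∧
                    r.2 < ((PySem.List.pyGetD matrix 0 []).length : Int) ∧ pvGet2 matrix r.1 r.2 ≠ 0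
                then PySem.Set.add s r else s) s
            else s) s ↔
        p ∈ s ∨ ∃ j ∈ PySem.List.pyRange 0 ((PySem.List.pyGetD matrix 0 []).length : Int) 1,
          pvGet2 matrix i j = 0 ∧ ∃ r ∈ pvNbrs i j,
            (0 ≤ r.1 ∧ r.1 < (matrix.length : Int) ∧ 0 ≤ r.2 ∧
              r.2 < ((PySem.List.pyGetD matrix 0 []).length : Int) ∧ pvGet2 matrix r.1 r.2 ≠ 0) ∧ p = r := by
    intro i
    apply pvMemFoldGen
    intro s j p
    split_ifs with hz
    · rw [hin i j s p]; simp [hz]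
    · simp [hz]
  unfold pvErode
  rw [pvMemFoldGen _ _ (fun s i p => hmid i s p)]
  simp only [PySem.Set.empty, List.not_mem_nil, false_or]
  rw [pvRangeNat, pvRangeNat]
  simp only [List.mem_map, List.mem_range]
  constructor
  · rintro ⟨_, ⟨i, hi, rfl⟩, _, ⟨j, hj, rfl⟩, hrest⟩
    exact ⟨i, hi, j, hj, hrest⟩
  · rintro ⟨i, hi, j, hj, hrest⟩
    exact ⟨_, ⟨i, hi, rfl⟩, _, ⟨j, hj, rfl⟩, hrest⟩

-- a cell is collected iff A's erosion condition holds there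
theorem pvErodeCond (matrix : List (List Int)) (x y : Nat) (hx : x < matrix.length) :
    ((x : Int), (y : Int)) ∈ pvErode matrix ↔ pvCond matrix x y (pvGet2 matrix x y) := by
  rw [pvMemErode]
  simp only [pvCond, List.any_eq_true, List.mem_filter, decide_eq_true_eq, beq_iff_eq]
  constructor
  · rintro ⟨i, hi, j, hj, hz, r, hr, ⟨b1, b2, b3, b4, b5⟩, hp⟩
    subst hp
    dsimp only at b1 b2 b3 b4 b5
    refine ⟨b4, b5, ((i : Int), (j : Int)), ⟨?_, by omega, by omega, by omega, by omega⟩, hz⟩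
    exact (pvNbrs_symm (i : Int) (j : Int) (x : Int) (y : Int)).mp hr
  · rintro ⟨hyn, hv, q, ⟨hq, c1, c2, c3, c4⟩, hz⟩
    have h1 : ((q.1.toNat : Nat) : Int) = q.1 := Int.toNat_of_nonneg c1
    have h2 : ((q.2.toNat : Nat) : Int) = q.2 := Int.toNat_of_nonneg c3
    refine ⟨q.1.toNat, by omega, q.2.toNat, by omega, ?_, ((x : Int), (y : Int)), ?_, ?_, rfl⟩
    · rw [h1, h2]; exact hz
    · rw [h1, h2]
      refine (pvNbrs_symm (x : Int) (y : Int) q.1 q.2).mp ?_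
      rwa [← Prod.mk.eta (p := q)] at hq
    · exact ⟨by omega, by omega, by omega, hyn, hv⟩

theorem pvGetD_set {α : Type} (g : List α) (d : α) (x r : Nat) (w : α) (hr : r < g.length) :
    (g.set x w).getD r d = if x = r then w else g.getD r d := by
  rw [List.getD_eq_getElem _ _ (by simpa using hr), List.getD_eq_getElem _ _ hr, List.getElem_set]

-- the deferred writes, applied to mat, pointwise
theorem pvWriteFold (L : List (Int × Int)) :
    ∀ (mat : List (List Int)),
      (∀ p ∈ L, ∃ x y : Nat, p = ((x : Int), (y : Int)) ∧ x < mat.length ∧ y < (mat.getD x []).length) →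
      (L.foldl (fun g p => pvSet2 g p.1 p.2 0) mat).length = mat.length ∧
      ∀ r : Nat, r < mat.length →
        ((L.foldl (fun g p => pvSet2 g p.1 p.2 0) mat).getD r []).length = (mat.getD r []).length ∧
        ∀ c : Nat, c < (mat.getD r []).length →
          ((L.foldl (fun g p => pvSet2 g p.1 p.2 0) mat).getD r []).getD c 0 =
            if ((r : Int), (c : Int)) ∈ L then 0 else (mat.getD r []).getD c 0 := by
  induction L with
  | nil => intro mat _; simp
  | cons p L ih =>
    intro mat hb
    obtain ⟨x, y, hp, hxm, hyn⟩ := hb p List.mem_cons_self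
    have hstep : pvSet2 mat p.1 p.2 0 = mat.set x ((mat.getD x []).set y 0) := by
      rw [hp]
      simp [pvSet2, PySem.List.pySetD_natCast, PySem.List.pyGetD_natCast]
    set mat' := mat.set x ((mat.getD x []).set y 0) with hmat'
    have hlen' : mat'.length = mat.length := by simp [hmat']
    have hrows' : ∀ r : Nat, r < mat.length → (mat'.getD r []).length = (mat.getD r []).length := by
      intro r hr
      rw [hmat', pvGetD_set _ _ _ _ _ hr]
      split_ifs with h
      · rw [← h]; simp
      · rfl
    have hb' : ∀ q ∈ L, ∃ a b : Nat, q = ((a : Int), (b : Int)) ∧ a < mat'.length ∧ b < (mat'.getD a []).length := by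
      intro q hq
      obtain ⟨a, b, hq1, hq2, hq3⟩ := hb q (List.mem_cons_of_mem _ hq)
      exact ⟨a, b, hq1, by omega, by rw [hrows' a hq2]; exact hq3⟩
    rw [List.foldl_cons, hstep]
    obtain ⟨ihlen, ihrows⟩ := ih mat' hb'
    refine ⟨by omega, ?_⟩
    intro r hr
    obtain ⟨ihrl, ihent⟩ := ihrows r (by omega)
    refine ⟨by rw [ihrl, hrows' r hr], ?_⟩
    intro c hc
    rw [ihent c (by rw [hrows' r hr]; exact hc)]
    have hmat'entry : (mat'.getD r []).getD c 0 =
        if x = r ∧ y = c then 0 else (mat.getD r []).getD c 0 := by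
      rw [hmat', pvGetD_set _ _ _ _ _ hr]
      by_cases h1 : x = r
      · have hc' : c < (mat.getD x []).length := by rw [h1]; exact hc
        rw [if_pos h1, ← h1, pvGetD_set _ _ _ _ _ hc']
        split_ifs with ha hb hb
        · rfl
        · exact absurd ⟨rfl, ha⟩ hb
        · exact absurd hb.2 ha
        · rfl
      · rw [if_neg h1, if_neg (fun hh => h1 hh.1)]
    rw [hmat'entry, hp]
    have hpair : (((r : Int), (c : Int)) = ((x : Int), (y : Int))) ↔ (x = r ∧ y = c) := by
      simp only [Prod.mk.injEq, Int.natCast_inj]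
      tauto
    by_cases hmem : ((r : Int), (c : Int)) ∈ L
    · simp [hmem]
    · simp only [List.mem_cons, hmem, or_false]
      by_cases he : ((r : Int), (c : Int)) = ((x : Int), (y : Int))
      · rw [if_pos he, if_pos (hpair.mp he)]
        simp
      · rw [if_neg he, if_neg (fun hh => he (hpair.mpr hh))]
        simp

theorem pvB_eq_mid (matrix : List (List Int)) (hpre : Pre_nextLayer matrix) :
    nextLayer_alt matrix = pvMid matrix matrix.length 0 := by
  have hb : ∀ p ∈ pvErode matrix, ∃ x y : Nat,
      p = ((x : Int), (y : Int)) ∧ x < matrix.length ∧ y < (matrix.getD x []).length := by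
    intro p hp
    rw [pvMemErode] at hp
    obtain ⟨i, hi, j, hj, hz, r, hr, ⟨b1, b2, b3, b4, b5⟩, rfl⟩ := hp
    refine ⟨p.1.toNat, p.2.toNat, ?_, by omega, ?_⟩
    · have h1 : ((p.1.toNat : Nat) : Int) = p.1 := Int.toNat_of_nonneg b1
      have h2 : ((p.2.toNat : Nat) : Int) = p.2 := Int.toNat_of_nonneg b3
      rw [h1, h2]
    · have hmem : matrix.getD p.1.toNat [] ∈ matrix := by
        rw [List.getD_eq_getElem _ _ (by omega)]
        exact List.getElem_mem _
      have hle := hpre.2 _ hmem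
      omega
  unfold nextLayer_alt
  obtain ⟨hlen, hrows⟩ := pvWriteFold (pvErode matrix) matrix hb
  apply List.ext_getElem
  · rw [hlen, pvMid_length]
  · intro r h1 h2
    have hr : r < matrix.length := by omega
    rw [pvMid_getElem]
    simp only [hr, if_pos]
    obtain ⟨hrl, hent⟩ := hrows r hr
    have hgetDr : ((pvErode matrix).foldl (fun g p => pvSet2 g p.1 p.2 0) matrix).getD r [] =
        ((pvErode matrix).foldl (fun g p => pvSet2 g p.1 p.2 0) matrix)[r]'h1 :=
      List.getD_eq_getElem _ _ h1
    have hgetDm : matrix.getD r [] = matrix[r]'hr := List.getD_eq_getElem _ _ hr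
    apply List.ext_getElem
    · rw [pvRowT_length, ← hgetDm, ← hrl, hgetDr]
    · intro c hc1 hc2
      have hcm : c < (matrix[r]'hr).length := by
        rw [pvRowT_length] at hc2; exact hc2
      have hcd : c < (matrix.getD r []).length := by rw [hgetDm]; exact hcm
      have hval : (((pvErode matrix).foldl (fun g p => pvSet2 g p.1 p.2 0) matrix)[r]'h1).getD c 0 =
          if ((r : Int), (c : Int)) ∈ pvErode matrix then 0 else (matrix.getD r []).getD c 0 := by
        rw [← hgetDr]; exact hent c hcd
      have hcr : c < (((pvErode matrix).foldl (fun g p => pvSet2 g p.1 p.2 0) matrix)[r]'h1).length := hc1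
      rw [pvRowT_getElem]
      have hgetc : (((pvErode matrix).foldl (fun g p => pvSet2 g p.1 p.2 0) matrix)[r]'h1)[c]'hc1 =
          (((pvErode matrix).foldl (fun g p => pvSet2 g p.1 p.2 0) matrix)[r]'h1).getD c 0 :=
        (List.getD_eq_getElem _ _ hc1).symm
      rw [hgetc, hval]
      have hgv : pvGet2 matrix r c = (matrix[r]'hr)[c]'hcm := by
        simp only [pvGet2, PySem.List.pyGetD_natCast, hgetDm]
        exact List.getD_eq_getElem _ _ hcm
      simp only [pvErodeCond matrix r c hr, hgv, hgetDm, List.getD_eq_getElem _ _ hcm]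
      split_ifs with hA hB hB
      · rfl
      · exact absurd ⟨hcm, hA⟩ hB
      · exact absurd hB.2 hA
      · rfl

-- ===== VERDICT (by name: the statement is the Claim_ definition above) =====
theorem nextLayer_spec : Claim_equal_nextLayer := by
  intro matrix _ hpre
  unfold Spec_nextLayer
  rw [pvA_eq_mid matrix hpre, pvB_eq_mid matrix hpre]
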